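-- pv_equiv track=rewrite | github.com/Vardhan8182/AIAC | lab test 3/task_1.py | fib_tab_sequence
-- ===== SOURCE A (Python) =====
-- def fib_tab_sequence(k: int) -> list:
--     """Return the first k Fibonacci numbers (starting from F0) using tabulation."""
--     if k <= 0:
--         return []
--     if k == 1:
--         return [0]
--     seq = [0] * k
--     seq[0], seq[1] = 0, 1
--     for i in range(2, k):
--         seq[i] = seq[i - 1] + seq[i - 2]
--     return seq
-- ===== SOURCE B (Python) =====
-- def fib_tab_sequence(k: int) -> list:
--     """Return the first k Fibonacci numbers (starting from F0), computing each
--     F(i) independently by the fast-doubling identities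
--     F(2n) = F(n)*(2F(n+1)-F(n)), F(2n+1) = F(n)^2 + F(n+1)^2."""
--     def fib_pair(n):
--         # n >= 0; returns (F(n), F(n+1)) by fast doubling
--         if n == 0:
--             return (0, 1)
--         f, g = fib_pair(n // 2)
--         c = f * (2 * g - f)
--         d = f * f + g * g
--         if n % 2 == 0:
--             return (c, d)
--         return (d, c + d)
--     return [fib_pair(i)[0] for i in range(k)]
-- ===== Notes on version B (the rewrite author's own statement) =====
-- stated objective: alternative
-- what changed: Replaces the linear tabulation (each entry from the two previous table slots) by computing each F(i) independently with the recursive fast-doubling identities F(2n)=F(n)(2F(n+1)-F(n)), F(2n+1)=F(n)^2+F(n+1)^2, collected by a comprehension over range(k).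
import Mathlib
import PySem

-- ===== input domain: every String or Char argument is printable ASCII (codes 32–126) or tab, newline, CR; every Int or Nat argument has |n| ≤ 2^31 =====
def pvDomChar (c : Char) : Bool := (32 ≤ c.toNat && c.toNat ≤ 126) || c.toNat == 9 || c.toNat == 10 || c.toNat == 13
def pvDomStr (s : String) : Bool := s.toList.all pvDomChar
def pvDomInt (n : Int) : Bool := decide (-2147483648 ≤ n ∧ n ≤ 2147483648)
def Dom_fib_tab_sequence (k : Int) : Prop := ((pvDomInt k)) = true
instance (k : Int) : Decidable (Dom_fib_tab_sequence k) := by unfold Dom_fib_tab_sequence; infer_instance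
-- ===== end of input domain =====

-- B replaces the tabulation (each entry from the two previous slots of a preallocated table)
-- by computing each F(i) independently via the recursive fast-doubling identities,
-- collected by a comprehension over range(k): a genuinely different algorithm.

-- ===== PORT A =====
def fib_tab_sequence (k : Int) : List Int :=
  if k ≤ 0 then []
  else if k = 1 then [0]
  else
    let seq := PySem.List.pyRepeat [(0 : Int)] k            -- seq = [0] * k
    let seq := PySem.List.pySetD seq 0 0                    -- seq[0] = 0
    let seq := PySem.List.pySetD seq 1 1                    -- seq[1] = 1
    (PySem.List.pyRange 2 k 1).foldl                        -- for i in range(2, k):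
      (fun seq i => PySem.List.pySetD seq i
        (PySem.List.pyGetD seq (i - 1) 0 + PySem.List.pyGetD seq (i - 2) 0)) seq

-- ===== PORT B =====
-- hand port of Source B's fib_pair over Nat (the Python helper is only ever called with the
-- nonnegative values of range(k), where `//` and `%` agree with Nat division; exact there)
def fibPair (n : Nat) : Int × Int :=
  if h : n = 0 then (0, 1)
  else
    let p := fibPair (n / 2)                                -- f, g = fib_pair(n // 2)
    let c := p.1 * (2 * p.2 - p.1)                          -- c = f * (2 * g - f)
    let d := p.1 * p.1 + p.2 * p.2                          -- d = f * f + g * g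
    if n % 2 = 0 then (c, d) else (d, c + d)
termination_by n
decreasing_by exact Nat.div_lt_self (Nat.pos_of_ne_zero h) (by norm_num)

def fib_tab_sequence_alt (k : Int) : List Int :=
  (PySem.List.pyRange 0 k 1).map (fun i => (fibPair i.toNat).1)   -- [fib_pair(i)[0] for i in range(k)]

-- ===== PRECONDITION & SPEC =====
def Spec_fib_tab_sequence (k : Int) (out : List Int) : Prop := out = fib_tab_sequence_alt k
instance (k : Int) (out : List Int) : Decidable (Spec_fib_tab_sequence k out) := by unfold Spec_fib_tab_sequence; infer_instance

-- ===== CLAIM (what is proved, stated in full; the proofs are below) =====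
def Claim_equal_fib_tab_sequence : Prop := ∀ (k : Int), Dom_fib_tab_sequence k → Spec_fib_tab_sequence k (fib_tab_sequence k)

-- ===== LEMMAS AND PROOFS =====

/-- Reference sequence: first `n` values of the series starting `a, b`. -/
def fibAux : Nat → Int → Int → List Int
  | 0, _, _ => []
  | n + 1, a, b => a :: fibAux n b (a + b)

/-- `i`-th value of the series starting `a, b`. -/
def fibVal : Nat → Int → Int → Int
  | 0, a, _ => a
  | n + 1, a, b => fibVal n b (a + b)

theorem length_fibAux (n : Nat) (a b : Int) : (fibAux n a b).length = n := by
  induction n generalizing a b with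
  | zero => rfl
  | succ n ih => simp [fibAux, ih]

theorem fibVal_add (n : Nat) (a b : Int) :
    fibVal (n + 2) a b = fibVal (n + 1) a b + fibVal n a b := by
  induction n generalizing a b with
  | zero => simp [fibVal]; ring
  | succ n ih => simpa [fibVal] using ih b (a + b)

theorem fibAux_snoc (n : Nat) (a b : Int) :
    fibAux (n + 1) a b = fibAux n a b ++ [fibVal n a b] := by
  induction n generalizing a b with
  | zero => rfl
  | succ n ih =>
    calc fibAux (n + 2) a b = a :: fibAux (n + 1) b (a + b) := rfl
    _ = a :: (fibAux n b (a + b) ++ [fibVal n b (a + b)]) := by rw [ih]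
    _ = fibAux (n + 1) a b ++ [fibVal (n + 1) a b] := rfl

theorem getElem_fibAux (n i : Nat) (a b : Int) (h : i < n) :
    (fibAux n a b)[i]'(by simpa [length_fibAux] using h) = fibVal i a b := by
  induction n generalizing i a b with
  | zero => omega
  | succ n ih =>
    cases i with
    | zero => rfl
    | succ i => simpa [fibAux, fibVal] using ih i b (a + b) (by omega)

/-- `fibVal i 0 1` is the `i`-th Fibonacci number. -/
theorem fibVal_eq_fib (i : Nat) : fibVal i 0 1 = (Nat.fib i : Int) := by
  induction i using Nat.strong_induction_on with
  | _ i ih =>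
    match i with
    | 0 => rfl
    | 1 => rfl
    | n + 2 =>
      rw [fibVal_add, ih (n + 1) (by omega), ih n (by omega), Nat.fib_add_two]
      push_cast; ring

/-- Correctness of fast doubling: `fibPair n = (F(n), F(n+1))`. -/
theorem fibPair_eq (n : Nat) : fibPair n = ((Nat.fib n : Int), (Nat.fib (n + 1) : Int)) := by
  induction n using Nat.strong_induction_on with
  | _ n ih =>
    rw [fibPair]
    by_cases h0 : n = 0
    · simp [h0]
    · simp only [h0, dif_neg, not_false_iff]
      rw [ih (n / 2) (Nat.div_lt_self (Nat.pos_of_ne_zero h0) (by norm_num))]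
      have hc : ((Nat.fib (n / 2) : Int)) * (2 * (Nat.fib (n / 2 + 1) : Int) - (Nat.fib (n / 2) : Int))
          = (Nat.fib (2 * (n / 2)) : Int) := by
        rw [Nat.fib_two_mul]
        have hle : Nat.fib (n / 2) ≤ 2 * Nat.fib (n / 2 + 1) :=
          le_trans (Nat.fib_le_fib_succ) (by omega)
        push_cast [Nat.cast_sub hle]
        ring
      have hd : ((Nat.fib (n / 2) : Int)) * (Nat.fib (n / 2) : Int)
            + (Nat.fib (n / 2 + 1) : Int) * (Nat.fib (n / 2 + 1) : Int)
          = (Nat.fib (2 * (n / 2) + 1) : Int) := by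
        rw [Nat.fib_two_mul_add_one]
        push_cast
        ring
      by_cases hpar : n % 2 = 0
      · have hn : 2 * (n / 2) = n := by omega
        simp only [hpar, if_pos]
        rw [hc, hd, hn]
      · have hn : 2 * (n / 2) + 1 = n := by omega
        simp only [hpar, if_neg, not_false_iff]
        rw [hc, hd, hn]
        have hsum : (Nat.fib (2 * (n / 2)) : Int) + (Nat.fib n : Int) = (Nat.fib (n + 1) : Int) := by
          rw [show n + 1 = 2 * (n / 2) + 2 by omega, Nat.fib_add_two,
            show 2 * (n / 2) + 1 = n by omega]
          push_cast
          ring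
        rw [hsum]

/-- B's comprehension equals the reference list. -/
theorem altEq (k : Int) : fib_tab_sequence_alt k = fibAux k.toNat 0 1 := by
  unfold fib_tab_sequence_alt
  rw [PySem.List.pyRange_one]
  apply List.ext_getElem
  · simp [length_fibAux]
  · intro i h1 h2
    simp only [List.getElem_map, List.getElem_range]
    have hi : i < k.toNat := by simpa [length_fibAux] using h2
    rw [getElem_fibAux _ _ _ _ hi, fibVal_eq_fib, fibPair_eq]
    simp

/-- One iteration of A's tabulation loop, on the invariant state. -/
theorem stepA (n m : Nat) (h2 : 2 ≤ m) (hmn : m < n) :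
    PySem.List.pySetD (fibAux m 0 1 ++ List.replicate (n - m) 0) (m : Int)
        (PySem.List.pyGetD (fibAux m 0 1 ++ List.replicate (n - m) 0) ((m : Int) - 1) 0
          + PySem.List.pyGetD (fibAux m 0 1 ++ List.replicate (n - m) 0) ((m : Int) - 2) 0)
      = fibAux (m + 1) 0 1 ++ List.replicate (n - (m + 1)) 0 := by
  have hlen : (fibAux m 0 1 ++ List.replicate (n - m) 0).length = n := by
    simp [length_fibAux]; omega
  have hc1 : ((m : Int) - 1) = ((m - 1 : Nat) : Int) := by omega
  have hc2 : ((m : Int) - 2) = ((m - 2 : Nat) : Int) := by omega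
  simp only [hc1, hc2, PySem.List.pyGetD_natCast, PySem.List.pySetD_natCast]
  have hg1 : (fibAux m 0 1 ++ List.replicate (n - m) 0).getD (m - 1) 0 = fibVal (m - 1) 0 1 := by
    rw [List.getD_eq_getElem _ _ (by omega)]
    rw [List.getElem_append_left (by simp [length_fibAux]; omega)]
    exact getElem_fibAux m (m - 1) 0 1 (by omega)
  have hg2 : (fibAux m 0 1 ++ List.replicate (n - m) 0).getD (m - 2) 0 = fibVal (m - 2) 0 1 := by
    rw [List.getD_eq_getElem _ _ (by omega)]
    rw [List.getElem_append_left (by simp [length_fibAux]; omega)]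
    exact getElem_fibAux m (m - 2) 0 1 (by omega)
  rw [hg1, hg2]
  have hrep : List.replicate (n - m) (0 : Int) = 0 :: List.replicate (n - (m + 1)) 0 := by
    have : n - m = (n - (m + 1)) + 1 := by omega
    rw [this, List.replicate_succ]
  rw [hrep, List.set_append_right _ _ (by simp [length_fibAux])]
  have hv : fibVal (m - 1) 0 1 + fibVal (m - 2) 0 1 = fibVal m 0 1 := by
    have := fibVal_add (m - 2) 0 1
    have e1 : m - 2 + 2 = m := by omega
    have e2 : m - 2 + 1 = m - 1 := by omega
    rw [e1, e2] at this
    omega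
  simp [length_fibAux, hv, fibAux_snoc m 0 1]

/-- A's loop invariant: after processing `range(2, m)` the table holds `fibAux m` then zeros. -/
theorem loopA (n : Nat) : ∀ (m : Nat), 2 ≤ m → m ≤ n →
    (PySem.List.pyRange 2 (m : Int) 1).foldl
      (fun seq i => PySem.List.pySetD seq i
        (PySem.List.pyGetD seq (i - 1) 0 + PySem.List.pyGetD seq (i - 2) 0))
      (fibAux 2 0 1 ++ List.replicate (n - 2) 0)
      = fibAux m 0 1 ++ List.replicate (n - m) 0 := by
  intro m
  induction m with
  | zero => omega
  | succ m ih =>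
    intro h2 hn
    rcases Nat.lt_or_ge 2 (m + 1) with h | h
    · have hm2 : 2 ≤ m := by omega
      have hcast : ((m + 1 : Nat) : Int) = (m : Int) + 1 := by push_cast; ring
      rw [hcast, PySem.List.pyRange_one_succ_right (by omega), List.foldl_append,
        ih hm2 (by omega), List.foldl_cons, List.foldl_nil, stepA n m hm2 (by omega)]
    · have hm : m = 1 := by omega
      subst hm
      rw [show (((1 : Nat) + 1 : Nat) : Int) = 2 by norm_num,
        PySem.List.pyRange_one_eq_nil (by omega)]
      rfl

theorem seq0Eq (k : Int) (hk : 2 ≤ k) :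
    PySem.List.pySetD (PySem.List.pySetD (PySem.List.pyRepeat [(0 : Int)] k) 0 0) 1 1
      = fibAux 2 0 1 ++ List.replicate (k.toNat - 2) 0 := by
  rw [PySem.List.pyRepeat_singleton]
  have h : k.toNat = (k.toNat - 2) + 2 := by omega
  rw [h]
  have hr : List.replicate (k.toNat - 2 + 2) (0 : Int)
      = 0 :: 0 :: List.replicate (k.toNat - 2) 0 := by
    rw [Nat.add_comm, List.replicate_add]; rfl
  rw [hr]
  simp [PySem.List.pySetD_of_nonneg, fibAux]

-- ===== VERDICT (by name: the statement is the Claim_ definition above) =====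
theorem fib_tab_sequence_spec : Claim_equal_fib_tab_sequence := by
  intro k _
  show fib_tab_sequence k = fib_tab_sequence_alt k
  rw [altEq]
  unfold fib_tab_sequence
  split_ifs with h0 h1
  · have : k.toNat = 0 := by omega
    simp [this, fibAux]
  · subst h1; rfl
  · have hk : 2 ≤ k := by omega
    simp only [seq0Eq k hk]
    have hm : ((k.toNat : Nat) : Int) = k := by omega
    have := loopA k.toNat k.toNat (by omega) (le_refl _)
    rw [hm] at this
    rw [this]
    simp
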